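-- pv_equiv track=rewrite | github.com/bluescreening/advent-of-code-24 | day2.py | safeFun
-- ===== SOURCE A (Python) =====
-- def safeFun(report):
--     # Working out if safe
--     # Checking for ascending or descending
--
--     ascOrDesc = False
--
--     if report == sorted(report):
--         ascOrDesc = True
--     elif report == sorted(report, reverse = True):
--         ascOrDesc = True
--
--     # Checking if any gaps are too big
--
--     gapSafe = True
--     for i in range(1, len(report)):
--         diff = abs(report[i] - report[i-1])
--         if diff < 1 or diff > 3:
--             gapSafe = False
--
--     # Works out if safe
--
--     isSafe = False
--
--     if ascOrDesc == True and gapSafe == True: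
--         isSafe = True
--
--     return(isSafe)
-- ===== SOURCE B (Python) =====
-- def safeFun(report):
--     # Single linear pass: safe iff every adjacent step is between 1 and 3, or every step is between -3 and -1.
--     diffs = [b - a for a, b in zip(report, report[1:])]
--     return all(1 <= d <= 3 for d in diffs) or all(-3 <= d <= -1 for d in diffs)
-- ===== Notes on version B (the rewrite author's own statement) =====
-- stated objective: faster
-- what changed: Replaces the two full sorts plus a separate gap loop with one linear pass over adjacent differences, checking that every difference is between 1 and 3 or every difference is between -3 and -1.
import Mathlib
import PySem

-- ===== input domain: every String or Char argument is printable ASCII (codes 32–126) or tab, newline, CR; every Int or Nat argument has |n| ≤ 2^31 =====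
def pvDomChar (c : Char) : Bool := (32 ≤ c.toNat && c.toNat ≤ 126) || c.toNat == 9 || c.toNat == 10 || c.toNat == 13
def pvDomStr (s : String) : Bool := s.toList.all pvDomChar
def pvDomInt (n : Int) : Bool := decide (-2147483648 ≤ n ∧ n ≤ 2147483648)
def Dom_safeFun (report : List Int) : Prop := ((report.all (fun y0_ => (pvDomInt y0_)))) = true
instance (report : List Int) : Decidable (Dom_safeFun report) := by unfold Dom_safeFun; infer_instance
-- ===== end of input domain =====

-- B replaces A's two sorts plus separate gap loop with one linear pass over adjacent differences (objective: faster).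

-- ===== PORT A =====
def safeFun (report : List Int) : Bool :=
  let ascOrDesc : Bool :=
    if report = PySem.List.sorted report (fun x => x) false then true
    else if report = PySem.List.sorted report (fun x => x) true then true
    else false
  let gapSafe : Bool :=
    (PySem.List.pyRange 1 (report.length : Int) 1).foldl
      (fun g i =>
        let diff := |PySem.List.pyGetD report i 0 - PySem.List.pyGetD report (i - 1) 0|
        if diff < 1 ∨ diff > 3 then false else g)
      true
  let isSafe : Bool := if ascOrDesc = true ∧ gapSafe = true then true else false
  isSafe

-- ===== PORT B =====
def safeFun_alt (report : List Int) : Bool :=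
  let diffs := (report.zip report.tail).map (fun p => p.2 - p.1)
  diffs.all (fun d => decide (1 ≤ d) && decide (d ≤ 3)) ||
  diffs.all (fun d => decide (-3 ≤ d) && decide (d ≤ -1))

-- ===== PRECONDITION & SPEC =====
def Spec_safeFun (report : List Int) (out : Bool) : Prop := out = safeFun_alt report
instance (report : List Int) (out : Bool) : Decidable (Spec_safeFun report out) := by unfold Spec_safeFun; infer_instance

-- ===== CLAIM (what is proved, stated in full; the proofs are below) =====
def Claim_equal_safeFun : Prop := ∀ (report : List Int), Dom_safeFun report → Spec_safeFun report (safeFun report)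

-- ===== LEMMAS AND PROOFS =====

-- The false-latch loop of A's gap check returns true iff no element of the list satisfies p.
theorem foldl_latch (p : Int → Prop) [DecidablePred p] (l : List Int) (b : Bool) :
    l.foldl (fun g i => if p i then false else g) b = (b && l.all (fun i => !decide (p i))) := by
  induction l generalizing b with
  | nil => simp
  | cons x xs ih =>
    simp only [List.foldl_cons, List.all_cons, ih]
    by_cases h : p x <;> simp [h]

-- report == sorted(report) names exactly the ≤-sorted lists.
theorem sorted_id_iff (report : List Int) :
    report = PySem.List.sorted report (fun x => x) false ↔
      List.Pairwise (· ≤ ·) report := by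
  constructor
  · intro h
    have := PySem.List.sorted_pairwise (xs := report) (key := fun x => x)
    rw [← h] at this
    simpa using this
  · intro h
    exact (PySem.List.sorted_eq_self_of_pairwise report (fun x => x) (by simpa using h)).symm

theorem sorted_id_rev_iff (report : List Int) :
    report = PySem.List.sorted report (fun x => x) true ↔
      List.Pairwise (fun a b => b ≤ a) report := by
  constructor
  · intro h
    have := PySem.List.sorted_pairwise_rev (xs := report) (key := fun x => x)
    rw [← h] at this
    simpa using this
  · intro h
    exact (PySem.List.sorted_rev_eq_self_of_pairwise report (fun x => x) (by simpa using h)).symm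

-- Pairwise on a transitive relation is the adjacent-pairs condition.
theorem pairwise_iff_adj (r : Int → Int → Prop) [IsTrans Int r] (l : List Int) :
    List.Pairwise r l ↔ ∀ k (_ : k + 1 < l.length), r l[k] l[k + 1] := by
  rw [← List.isChain_iff_pairwise, List.isChain_iff_getElem]

-- B's all-over-zip is the adjacent-pairs condition.
theorem all_zip_iff (q : Int → Prop) [DecidablePred q] (l : List Int) :
    ((l.zip l.tail).map (fun p => p.2 - p.1)).all (fun d => decide (q d)) = true ↔
      ∀ k (_ : k + 1 < l.length), q (l[k + 1] - l[k]) := by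
  simp only [List.all_map, List.all_eq_true, Function.comp]
  constructor
  · intro h k hk
    have hm : (l[k], l[k + 1]) ∈ l.zip l.tail := by
      have hidx : (l.zip l.tail)[k]? = some (l[k], l[k + 1]) := by
        rw [List.getElem?_zip_eq_some]
        constructor
        · exact List.getElem?_eq_getElem (by omega)
        · rw [List.getElem?_tail]; exact List.getElem?_eq_getElem (by omega)
      exact List.mem_of_getElem? hidx
    simpa using h _ hm
  · intro h p hp
    obtain ⟨k, hk, hEq⟩ := List.mem_iff_getElem.mp hp
    have hk2 : k + 1 < l.length := by
      simp only [List.length_zip, List.length_tail] at hk; omega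
    have : p = (l[k], l[k + 1]) := by
      rw [← hEq, List.getElem_zip]
      congr 1
      exact List.getElem_tail _
    subst this
    simpa using h k hk2

-- A's gap loop is the adjacent-pairs condition on the absolute difference.
theorem gap_iff (l : List Int) :
    ((PySem.List.pyRange 1 (l.length : Int) 1).foldl
      (fun g i =>
        let diff := |PySem.List.pyGetD l i 0 - PySem.List.pyGetD l (i - 1) 0|
        if diff < 1 ∨ diff > 3 then false else g) true) = true ↔
      ∀ k (_ : k + 1 < l.length),
        ¬(|l[k + 1] - l[k]| < 1 ∨ |l[k + 1] - l[k]| > 3) := by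
  rw [foldl_latch (fun i => |PySem.List.pyGetD l i 0 - PySem.List.pyGetD l (i - 1) 0| < 1 ∨
        |PySem.List.pyGetD l i 0 - PySem.List.pyGetD l (i - 1) 0| > 3)]
  simp only [Bool.true_and, List.all_eq_true, PySem.List.mem_pyRange_one, Bool.not_eq_eq_eq_not,
    Bool.not_true, decide_eq_false_iff_not]
  constructor
  · intro h k hk
    have h1 : (0 : Int) ≤ (k : Int) + 1 := by omega
    have h2 : ((k : Int) + 1) < l.length := by exact_mod_cast hk
    have := h ((k : Int) + 1) ⟨by omega, h2⟩
    rw [PySem.List.pyGetD_eq_getElem _ _ h1 h2,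
        PySem.List.pyGetD_eq_getElem _ _ (by omega) (by omega)] at this
    have e1 : ((k : Int) + 1).toNat = k + 1 := by omega
    have e2 : ((k : Int) + 1 - 1).toNat = k := by omega
    simp only [e1, e2] at this
    exact this
  · intro h i hi
    obtain ⟨hi1, hi2⟩ := hi
    have hk : (i - 1).toNat + 1 < l.length := by omega
    have := h (i - 1).toNat hk
    rw [PySem.List.pyGetD_eq_getElem _ _ (by omega) hi2,
        PySem.List.pyGetD_eq_getElem _ _ (by omega) (by omega)]
    have e1 : i.toNat = (i - 1).toNat + 1 := by omega
    simp only [e1]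
    exact this

-- ===== VERDICT (by name: the statement is the Claim_ definition above) =====
theorem safeFun_spec : Claim_equal_safeFun := by
  unfold Claim_equal_safeFun Spec_safeFun
  intro report _
  rw [Bool.eq_iff_iff]
  unfold safeFun safeFun_alt
  simp only [Bool.or_eq_true, ← Bool.decide_and]
  rw [all_zip_iff (fun d => 1 ≤ d ∧ d ≤ 3), all_zip_iff (fun d => -3 ≤ d ∧ d ≤ -1)]
  have hasc := (sorted_id_iff report).trans (pairwise_iff_adj _ report)
  have hdesc := (sorted_id_rev_iff report).trans
    (@pairwise_iff_adj (fun a b => b ≤ a) ⟨fun _ _ _ h1 h2 => le_trans h2 h1⟩ report)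
  constructor
  · intro hA
    by_cases hc : (if report = PySem.List.sorted report (fun x => x) false then true
          else if report = PySem.List.sorted report (fun x => x) true then true
          else false) = true ∧
        (PySem.List.pyRange 1 (report.length : Int) 1).foldl
          (fun g i =>
            let diff := |PySem.List.pyGetD report i 0 - PySem.List.pyGetD report (i - 1) 0|
            if diff < 1 ∨ diff > 3 then false else g) true = true
    · obtain ⟨hod, hg⟩ := hc
      rw [gap_iff] at hg
      by_cases ha : report = PySem.List.sorted report (fun x => x) false
      · left
        intro k hk
        have hle := (hasc.mp ha) k hk
        have := hg k hk
        rw [abs_of_nonneg (by omega)] at this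
        omega
      · rw [if_neg ha] at hod
        by_cases hd : report = PySem.List.sorted report (fun x => x) true
        · right
          intro k hk
          have hle := (hdesc.mp hd) k hk
          have := hg k hk
          rw [abs_of_nonpos (by omega)] at this
          omega
        · rw [if_neg hd] at hod
          exact absurd hod (by simp)
    · rw [if_neg hc] at hA
      exact absurd hA (by simp)
  · intro hB
    have hg : (PySem.List.pyRange 1 (report.length : Int) 1).foldl
        (fun g i =>
          let diff := |PySem.List.pyGetD report i 0 - PySem.List.pyGetD report (i - 1) 0|
          if diff < 1 ∨ diff > 3 then false else g) true = true := by
      rw [gap_iff]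
      intro k hk
      rcases hB with h | h
      · have := h k hk
        rw [abs_of_nonneg (by omega)]
        omega
      · have := h k hk
        rw [abs_of_nonpos (by omega)]
        omega
    have hod : (if report = PySem.List.sorted report (fun x => x) false then true
        else if report = PySem.List.sorted report (fun x => x) true then true
        else false) = true := by
      by_cases ha : report = PySem.List.sorted report (fun x => x) false
      · rw [if_pos ha]
      · rw [if_neg ha, if_pos]
        apply hdesc.mpr
        intro k hk
        rcases hB with h | h
        · exact absurd (hasc.mpr (fun k hk => by have := h k hk; omega)) ha
        · have := h k hk; omega
    rw [if_pos ⟨hod, hg⟩]
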